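-- pv_equiv track=rewrite | github.com/laaam8203/DA_Homework_3 | Ha_Lenhart_tautcheck.py | _pick_binate_variable
-- ===== SOURCE A (Python) =====
-- from typing import List, Optional, Tuple
--
-- def _column(cubes: List[str], var: int) -> Tuple[int, int, int]:
--     """Return (count_0, count_1, count_dc) for variable *var*."""
--     c0 = c1 = cd = 0
--     for cube in cubes:
--         ch = cube[var]
--         if ch == '0':
--             c0 += 1
--         elif ch == '1':
--             c1 += 1
--         else:
--             cd += 1
--     return c0, c1, cd
--
-- def _pick_binate_variable(cubes: List[str], num_vars: int) -> int:
--     """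
--     Choose the most binate variable for splitting.
--     Heuristic: pick the binate variable whose column has the most
--     literals (i.e. fewest don't-cares → most constraining).
--     Among ties, pick the one closest to balanced (|c1 - c0| minimal).
--     """
--     best_var = -1
--     best_literal_count = -1
--     best_balance = float('inf')
--
--     for v in range(num_vars):
--         c0, c1, cd = _column(cubes, v)
--         if c0 == 0 or c1 == 0:
--             continue  # unate variable – skip
--         literal_count = c0 + c1
--         balance = abs(c1 - c0)
--         if (literal_count > best_literal_count or
--                 (literal_count == best_literal_count and balance < best_balance)):
--             best_var = v
--             best_literal_count = literal_count
--             best_balance = balance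
--
--     return best_var
-- ===== SOURCE B (Python) =====
-- def _pick_binate_variable(cubes, num_vars):
--     # One pass over the cubes accumulating per-variable (count_0, count_1)
--     # pairs, then a single pass over the accumulated columns.
--     counts = [(0, 0)] * num_vars
--     for cube in cubes:
--         counts = [(c0 + (ch == '0'), c1 + (ch == '1'))
--                   for (c0, c1), ch in zip(counts, cube)]
--     best_var = -1
--     best_lit = -1
--     best_bal = None
--     for v, (c0, c1) in enumerate(counts):
--         if c0 == 0 or c1 == 0:
--             continue
--         lit = c0 + c1
--         bal = abs(c1 - c0)
--         if lit > best_lit or (lit == best_lit and (best_bal is None or bal < best_bal)):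
--             best_var, best_lit, best_bal = v, lit, bal
--     return best_var
-- ===== Notes on version B (the rewrite author's own statement) =====
-- stated objective: alternative
-- what changed: Replaces A's per-variable rescans of the cube list (one _column call per variable) by a single accumulation pass over the cubes that zips per-variable (count0, count1) pairs, followed by one scan over the accumulated columns with the identical skip and tie-break rules.
import Mathlib
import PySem

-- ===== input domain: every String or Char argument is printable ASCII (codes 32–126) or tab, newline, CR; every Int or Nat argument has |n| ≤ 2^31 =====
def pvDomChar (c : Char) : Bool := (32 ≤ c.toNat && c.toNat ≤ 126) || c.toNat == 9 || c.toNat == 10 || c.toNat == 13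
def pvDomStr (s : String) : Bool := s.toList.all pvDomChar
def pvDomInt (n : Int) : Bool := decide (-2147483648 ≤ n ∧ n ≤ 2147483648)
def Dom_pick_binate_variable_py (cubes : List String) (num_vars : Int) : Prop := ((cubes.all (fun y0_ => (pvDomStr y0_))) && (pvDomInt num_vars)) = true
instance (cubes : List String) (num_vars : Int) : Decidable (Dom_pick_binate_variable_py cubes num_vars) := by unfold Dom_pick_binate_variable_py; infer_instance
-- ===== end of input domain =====

-- B replaces A's per-variable rescans of all cubes by a single accumulation pass over
-- the cubes followed by one scan of the accumulated columns (alternative decomposition,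
-- same asymptotic cost).

-- ===== PORT A =====
-- 'balance < best_balance' with best_balance = float('inf') modelled as Option Int (none = +inf)
def pvLtInf (bal : Int) : Option Int → Bool
  | none => true
  | some b => bal < b

-- _column: per-variable scan of all cubes; cube[var] is Str.pyGet? (none = IndexError,
-- excluded by Pre_, so .getD here never yields the default on admitted inputs)
def pvColumn (cubes : List String) (var : Int) : Int × Int × Int :=
  cubes.foldl
    (fun (acc : Int × Int × Int) cube =>
      let ch := (PySem.Str.pyGet? cube var).getD ' '
      if ch = '0' then (acc.1 + 1, acc.2.1, acc.2.2)
      else if ch = '1' then (acc.1, acc.2.1 + 1, acc.2.2)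
      else (acc.1, acc.2.1, acc.2.2 + 1))
    (0, 0, 0)

def pick_binate_variable_py (cubes : List String) (num_vars : Int) : Int :=
  ((PySem.List.pyRange 0 num_vars 1).foldl
    (fun (st : Int × Int × Option Int) v =>
      let c := pvColumn cubes v
      if c.1 = 0 ∨ c.2.1 = 0 then st
      else
        let lit := c.1 + c.2.1
        let bal := |c.2.1 - c.1|
        if lit > st.2.1 ∨ (lit = st.2.1 ∧ pvLtInf bal st.2.2 = true) then
          (v, lit, some bal)
        else st)
    (-1, -1, none)).1

-- ===== PORT B =====
-- counts = [(c0 + (ch == '0'), c1 + (ch == '1')) for (c0, c1), ch in zip(counts, cube)]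
def pvBump (p : Int × Int) (ch : Char) : Int × Int :=
  (p.1 + (if ch = '0' then 1 else 0), p.2 + (if ch = '1' then 1 else 0))

def pick_binate_variable_py_alt (cubes : List String) (num_vars : Int) : Int :=
  let counts := cubes.foldl
    (fun (acc : List (Int × Int)) cube => List.zipWith pvBump acc cube.toList)
    (List.replicate num_vars.toNat (0, 0))
  ((PySem.List.enumerate counts 0).foldl
    (fun (st : Int × Int × Option Int) p =>
      if p.2.1 = 0 ∨ p.2.2 = 0 then st
      else
        let lit := p.2.1 + p.2.2
        let bal := |p.2.2 - p.2.1|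
        if lit > st.2.1 ∨ (lit = st.2.1 ∧ pvLtInf bal st.2.2 = true) then
          (p.1, lit, some bal)
        else st)
    (-1, -1, none)).1
-- ===== PRECONDITION & SPEC =====
-- A raises IndexError (cube[v]) iff num_vars ≥ 1 and some cube is shorter than num_vars;
-- Pre_ excludes exactly those inputs.
def Pre_pick_binate_variable_py (cubes : List String) (num_vars : Int) : Prop :=
  num_vars ≤ 0 ∨ ∀ s ∈ cubes, num_vars ≤ PySem.Str.len s
instance (cubes : List String) (num_vars : Int) : Decidable (Pre_pick_binate_variable_py cubes num_vars) := by unfold Pre_pick_binate_variable_py; infer_instance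
def pvWitness_pick_binate_variable_py : List String × Int := (["01", "1-"], 2)

def Spec_pick_binate_variable_py (cubes : List String) (num_vars : Int) (out : Int) : Prop := out = pick_binate_variable_py_alt cubes num_vars
instance (cubes : List String) (num_vars : Int) (out : Int) : Decidable (Spec_pick_binate_variable_py cubes num_vars out) := by unfold Spec_pick_binate_variable_py; infer_instance

-- ===== CLAIM (what is proved, stated in full; the proofs are below) =====
def Claim_equal_pick_binate_variable_py : Prop := ∀ (cubes : List String) (num_vars : Int), Dom_pick_binate_variable_py cubes num_vars → Pre_pick_binate_variable_py cubes num_vars → Spec_pick_binate_variable_py cubes num_vars (pick_binate_variable_py cubes num_vars)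

-- ===== LEMMAS AND PROOFS =====

-- the selection step both ports perform, abstracted over where (c0, c1) come from
def pvSel (st : Int × Int × Option Int) (v c0 c1 : Int) : Int × Int × Option Int :=
  if c0 = 0 ∨ c1 = 0 then st
  else
    let lit := c0 + c1
    let bal := |c1 - c0|
    if lit > st.2.1 ∨ (lit = st.2.1 ∧ pvLtInf bal st.2.2 = true) then
      (v, lit, some bal)
    else st

def pvColStep (var : Int) (acc : Int × Int × Int) (cube : String) : Int × Int × Int :=
  let ch := (PySem.Str.pyGet? cube var).getD ' '
  if ch = '0' then (acc.1 + 1, acc.2.1, acc.2.2)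
  else if ch = '1' then (acc.1, acc.2.1 + 1, acc.2.2)
  else (acc.1, acc.2.1, acc.2.2 + 1)

theorem pvColumn_eq_foldl (cubes : List String) (var : Int) :
    pvColumn cubes var = cubes.foldl (pvColStep var) (0, 0, 0) := rfl

-- the column fold is additive in its initial accumulator
theorem pvColumn_aux_add (cubes : List String) (var : Int) (init : Int × Int × Int) :
    cubes.foldl (pvColStep var) init
    = (init.1 + (pvColumn cubes var).1,
       init.2.1 + (pvColumn cubes var).2.1,
       init.2.2 + (pvColumn cubes var).2.2) := by
  induction cubes generalizing init with
  | nil => simp [pvColumn]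
  | cons s rest ih =>
    rw [pvColumn_eq_foldl, List.foldl_cons, List.foldl_cons, ih, ih]
    unfold pvColStep
    set ch := (PySem.Str.pyGet? s var).getD ' ' with hch
    by_cases h0 : ch = '0' <;> by_cases h1 : ch = '1' <;>
      simp [h0, h1, Prod.ext_iff] <;> omega

def pvAccStep (acc : List (Int × Int)) (cube : String) : List (Int × Int) :=
  List.zipWith pvBump acc cube.toList

-- length of the accumulated counts is preserved when every cube is long enough
theorem pvCounts_len (cubes : List String) (acc : List (Int × Int))
    (hlen : ∀ s ∈ cubes, acc.length ≤ s.toList.length) :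
    (cubes.foldl pvAccStep acc).length = acc.length := by
  induction cubes generalizing acc with
  | nil => rfl
  | cons s rest ih =>
    have hs : acc.length ≤ s.toList.length := hlen s (by simp)
    have h1 : (pvAccStep acc s).length = acc.length := by
      simp only [pvAccStep, List.length_zipWith]; omega
    rw [List.foldl_cons, ih _ (fun t ht => by rw [h1]; exact hlen t (by simp [ht])), h1]

-- entry v of the accumulated counts adds column v's (count_0, count_1) to the start value
theorem pvCounts_get (cubes : List String) (acc : List (Int × Int)) (v : Nat)
    (hv : v < acc.length) (hlen : ∀ s ∈ cubes, acc.length ≤ s.toList.length) :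
    (cubes.foldl pvAccStep acc)[v]?
      = some (acc[v].1 + (pvColumn cubes (v : Int)).1,
              acc[v].2 + (pvColumn cubes (v : Int)).2.1) := by
  induction cubes generalizing acc with
  | nil => simp [pvColumn, List.getElem?_eq_getElem hv]
  | cons s rest ih =>
    have hs : acc.length ≤ s.toList.length := hlen s (by simp)
    have h1 : (pvAccStep acc s).length = acc.length := by
      simp only [pvAccStep, List.length_zipWith]; omega
    have hlen' : ∀ t ∈ rest, (pvAccStep acc s).length ≤ t.toList.length :=
      fun t ht => by rw [h1]; exact hlen t (by simp [ht])
    rw [List.foldl_cons, ih (pvAccStep acc s) (by omega) hlen']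
    have hvs : v < s.toList.length := by omega
    have hz : (pvAccStep acc s)[v]'(by omega) = pvBump acc[v] (s.toList[v]'hvs) :=
      List.getElem_zipWith
    have hcol : pvColumn (s :: rest) (v : Int)
        = ((pvColStep (v : Int) (0, 0, 0) s).1 + (pvColumn rest (v : Int)).1,
           (pvColStep (v : Int) (0, 0, 0) s).2.1 + (pvColumn rest (v : Int)).2.1,
           (pvColStep (v : Int) (0, 0, 0) s).2.2 + (pvColumn rest (v : Int)).2.2) := by
      rw [pvColumn_eq_foldl, List.foldl_cons, pvColumn_aux_add]
    rw [hz, hcol]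
    unfold pvColStep pvBump
    have hch : (PySem.Str.pyGet? s (v : Int)).getD ' ' = s.toList[v]'hvs := by
      rw [PySem.Str.pyGet?_natCast, List.getElem?_eq_getElem hvs]; rfl
    rw [hch]
    by_cases h0 : s.toList[v]'hvs = '0' <;> by_cases h1 : s.toList[v]'hvs = '1' <;>
      simp [h0, h1, Prod.ext_iff] <;> omega

theorem pvAcc_nil (cubes : List String) :
    cubes.foldl (fun (acc : List (Int × Int)) cube => List.zipWith pvBump acc cube.toList) []
      = ([] : List (Int × Int)) := by
  induction cubes with
  | nil => rfl
  | cons s r ih => simpa using ih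

-- ===== VERDICT (by name: the statement is the Claim_ definition above) =====
theorem pick_binate_variable_py_spec : Claim_equal_pick_binate_variable_py := by
  intro cubes nv _ hpre
  unfold Spec_pick_binate_variable_py
  by_cases hnv : nv ≤ 0
  · have h1 : PySem.List.pyRange 0 nv 1 = [] := PySem.List.pyRange_one_eq_nil hnv
    have h2 : nv.toNat = 0 := by omega
    have h3 := pvAcc_nil cubes
    rw [pick_binate_variable_py, pick_binate_variable_py_alt, h1, h2]
    simp [h3, PySem.List.enumerate_nil]
  · have hall : ∀ s ∈ cubes, nv ≤ PySem.Str.len s := by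
      rcases hpre with h | h
      · omega
      · exact h
    set n := nv.toNat with hn
    have hnv' : nv = (n : Int) := by omega
    have hlen : ∀ s ∈ cubes, (List.replicate n ((0:Int), (0:Int))).length ≤ s.toList.length := by
      intro s hs
      have h1 := hall s hs
      rw [PySem.Str.len_eq] at h1
      have h2 : s.toList.length = s.length := by simp
      simp only [List.length_replicate]
      omega
    have hclen : (cubes.foldl pvAccStep (List.replicate n ((0:Int),(0:Int)))).length = n := by
      rw [pvCounts_len cubes _ hlen]; simp
    set counts := cubes.foldl pvAccStep (List.replicate n ((0:Int), (0:Int))) with hcounts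
    have hmap : ∀ k : Nat, k < n →
        counts.getD k ((0:Int),(0:Int))
          = ((pvColumn cubes (k : Int)).1, (pvColumn cubes (k : Int)).2.1) := by
      intro k hk
      have h1 := pvCounts_get cubes (List.replicate n ((0:Int),(0:Int))) k (by simp [hk]) hlen
      simp only [List.getElem_replicate] at h1
      rw [List.getD_eq_getElem?_getD, hcounts, h1]
      simp
    -- A's fold, over List.range n
    have hA : pick_binate_variable_py cubes nv
        = ((List.range n).foldl
            (fun (st : Int × Int × Option Int) (k : Nat) =>
              pvSel st (k : Int) (pvColumn cubes (k : Int)).1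
                (pvColumn cubes (k : Int)).2.1) (-1, -1, none)).1 := by
      rw [pick_binate_variable_py, PySem.List.pyRange_one, List.foldl_map]
      have he : (nv - 0).toNat = n := by omega
      rw [he]
      congr 1
      apply PySem.List.foldl_congr_mem
      intro acc k _
      simp [pvSel]
    -- B's fold, over List.range n
    have hB : pick_binate_variable_py_alt cubes nv
        = ((List.range n).foldl
            (fun (st : Int × Int × Option Int) (k : Nat) =>
              pvSel st (k : Int) (pvColumn cubes (k : Int)).1
                (pvColumn cubes (k : Int)).2.1) (-1, -1, none)).1 := by
      rw [pick_binate_variable_py_alt]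
      rw [show (fun (acc : List (Int × Int)) cube => List.zipWith pvBump acc cube.toList)
            = pvAccStep from rfl, ← hn, ← hcounts]
      rw [PySem.List.enumerate_eq_map_pyRange counts ((0:Int),(0:Int)), List.foldl_map]
      have hl : PySem.List.len counts = (n : Int) := by
        rw [PySem.List.len_eq, hclen]
      rw [hl, PySem.List.pyRange_one, List.foldl_map]
      have he : ((n : Int) - 0).toNat = n := by omega
      rw [he]
      congr 1
      apply PySem.List.foldl_congr_mem
      intro acc k hk
      have hkn : k < n := List.mem_range.mp hk
      have hg : PySem.List.pyGetD counts ((0:Int) + (k:Int)) ((0:Int),(0:Int))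
          = ((pvColumn cubes (k : Int)).1, (pvColumn cubes (k : Int)).2.1) := by
        rw [show (0:Int) + (k:Int) = ((k:Nat):Int) by omega, PySem.List.pyGetD_natCast]
        exact hmap k hkn
      simp only [hg]
      simp [pvSel]
    rw [hA, hB]
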